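-- pv_equiv track=rewrite | github.com/insightfinder/InsightAgent | zabbix-maps-IF-dependency/update_IF_zabbix_map_dependency.py | create_component_links
-- ===== SOURCE A (Python) =====
-- def create_component_links(device_links, instance_component_dict):
--     """Transform device links to component links with deduplication"""
--     component_links = []
--     component_link_set = set()
--     skipped_count = 0
--
--     for link in device_links:
--         source_device = link.get('s')
--         target_device = link.get('t')
--
--         source_component = instance_component_dict.get(source_device)
--         target_component = instance_component_dict.get(target_device)
--
--         if source_component and target_component:
--             link_tuple = (source_component, target_component)
--
--             if link_tuple not in component_link_set:
--                 component_link_set.add(link_tuple)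
--                 component_links.append({
--                     "s": source_component,
--                     "t": target_component
--                 })
--         else:
--             skipped_count += 1
--
--     return component_links, skipped_count
-- ===== SOURCE B (Python) =====
-- def create_component_links(device_links, instance_component_dict):
--     """Transform device links to component links with deduplication"""
--     pairs = [(instance_component_dict.get(link.get('s')),
--               instance_component_dict.get(link.get('t')))
--              for link in device_links]
--     skipped_count = sum(1 for s, t in pairs if not (s and t))
--     deduped = dict.fromkeys((s, t) for s, t in pairs if s and t)
--     component_links = [{"s": s, "t": t} for s, t in deduped]
--     return component_links, skipped_count
-- ===== Notes on version B (the rewrite author's own statement) =====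
-- stated objective: simpler
-- what changed: Replaces A's single stateful loop carrying an output list, a seen-set and a counter with three declarative passes: build the component-pair list once, count the skipped links with sum(), and dedup the valid pairs in first-occurrence order via dict.fromkeys before materializing the dicts.
import Mathlib
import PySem

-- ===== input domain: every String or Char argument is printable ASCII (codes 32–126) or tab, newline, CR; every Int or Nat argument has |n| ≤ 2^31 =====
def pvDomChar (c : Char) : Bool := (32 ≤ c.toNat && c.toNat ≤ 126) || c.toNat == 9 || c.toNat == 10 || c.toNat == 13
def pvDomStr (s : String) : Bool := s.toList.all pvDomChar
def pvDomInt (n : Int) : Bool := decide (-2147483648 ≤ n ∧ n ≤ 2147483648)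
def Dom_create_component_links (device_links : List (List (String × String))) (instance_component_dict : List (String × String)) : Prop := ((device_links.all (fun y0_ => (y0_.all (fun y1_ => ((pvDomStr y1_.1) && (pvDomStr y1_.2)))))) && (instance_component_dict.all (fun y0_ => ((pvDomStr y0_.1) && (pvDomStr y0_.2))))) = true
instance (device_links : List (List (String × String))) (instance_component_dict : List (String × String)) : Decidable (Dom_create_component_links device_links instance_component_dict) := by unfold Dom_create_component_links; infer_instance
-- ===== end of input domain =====

-- B replaces A's single stateful loop (output list + seen-set + counter) by three declarative
-- passes: map links to component pairs, count the skipped ones, dedup the valid ones in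
-- first-occurrence order (dict.fromkeys) and materialize; objective: simpler.


-- Python truthiness of an Optional[str]: truthy iff it is a non-empty string
def pvTruthy (o : Option String) : Bool := !((o.getD "") == "")

-- {"s": p.1, "t": p.2}
def pvMkLink (p : String × String) : List (String × String) := [("s", p.1), ("t", p.2)]

-- ===== PORT A =====
def create_component_links (device_links : List (List (String × String))) (instance_component_dict : List (String × String)) : (List (List (String × String))) × Int :=
  let st := device_links.foldl
    (fun (st : List (List (String × String)) × PySem.Set (String × String) × Int) link =>
      let source_device := (PySem.Dict.mk link).get? "s"
      let target_device := (PySem.Dict.mk link).get? "t"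
      let source_component := source_device.bind (fun d => (PySem.Dict.mk instance_component_dict).get? d)
      let target_component := target_device.bind (fun d => (PySem.Dict.mk instance_component_dict).get? d)
      if pvTruthy source_component && pvTruthy target_component then
        let link_tuple := (source_component.getD "", target_component.getD "")
        if PySem.Set.contains st.2.1 link_tuple then st
        else (st.1 ++ [pvMkLink link_tuple], PySem.Set.add st.2.1 link_tuple, st.2.2)
      else (st.1, st.2.1, st.2.2 + 1))
    ([], PySem.Set.empty, 0)
  (st.1, st.2.2)

-- ===== PORT B =====
def create_component_links_alt (device_links : List (List (String × String))) (instance_component_dict : List (String × String)) : (List (List (String × String))) × Int :=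
  let pairs := device_links.map (fun link =>
    (((PySem.Dict.mk link).get? "s").bind (fun d => (PySem.Dict.mk instance_component_dict).get? d),
     ((PySem.Dict.mk link).get? "t").bind (fun d => (PySem.Dict.mk instance_component_dict).get? d)))
  let skipped_count : Int := pairs.countP (fun p => !(pvTruthy p.1 && pvTruthy p.2))
  -- a truthy Option String is 'some x'; '.getD ""' is exactly that x
  let deduped := PySem.List.dedup (pairs.filterMap (fun p =>
    if pvTruthy p.1 && pvTruthy p.2 then some (p.1.getD "", p.2.getD "") else none))
  (deduped.map pvMkLink, skipped_count)

-- ===== PRECONDITION & SPEC =====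
def Spec_create_component_links (device_links : List (List (String × String))) (instance_component_dict : List (String × String)) (out : (List (List (String × String))) × Int) : Prop := out = create_component_links_alt device_links instance_component_dict
instance (device_links : List (List (String × String))) (instance_component_dict : List (String × String)) (out : (List (List (String × String))) × Int) : Decidable (Spec_create_component_links device_links instance_component_dict out) := by unfold Spec_create_component_links; infer_instance

-- ===== CLAIM (what is proved, stated in full; the proofs are below) =====
def Claim_equal_create_component_links : Prop := ∀ (device_links : List (List (String × String))) (instance_component_dict : List (String × String)), Dom_create_component_links device_links instance_component_dict → Spec_create_component_links device_links instance_component_dict (create_component_links device_links instance_component_dict)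

-- ===== LEMMAS AND PROOFS =====

-- the component pair of one device link
def pvPairOf (instance_component_dict : List (String × String)) (link : List (String × String)) : Option String × Option String :=
  (((PySem.Dict.mk link).get? "s").bind (fun d => (PySem.Dict.mk instance_component_dict).get? d),
   ((PySem.Dict.mk link).get? "t").bind (fun d => (PySem.Dict.mk instance_component_dict).get? d))

-- the valid (string) pairs of a list of device links
def pvValid (instance_component_dict : List (String × String)) (l : List (List (String × String))) : List (String × String) :=
  (l.map (pvPairOf instance_component_dict)).filterMap (fun p =>
    if pvTruthy p.1 && pvTruthy p.2 then some (p.1.getD "", p.2.getD "") else none)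

-- A's loop step
def pvStep (instance_component_dict : List (String × String))
    (st : List (List (String × String)) × PySem.Set (String × String) × Int)
    (link : List (String × String)) : List (List (String × String)) × PySem.Set (String × String) × Int :=
  let p := pvPairOf instance_component_dict link
  if pvTruthy p.1 && pvTruthy p.2 then
    let link_tuple := (p.1.getD "", p.2.getD "")
    if PySem.Set.contains st.2.1 link_tuple then st
    else (st.1 ++ [pvMkLink link_tuple], PySem.Set.add st.2.1 link_tuple, st.2.2)
  else (st.1, st.2.1, st.2.2 + 1)

lemma pvLoop_inv (icd : List (String × String)) (l : List (List (String × String)))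
    (vs : List (String × String)) (k : Int) :
    l.foldl (pvStep icd) ((PySem.Set.ofList vs).map pvMkLink, PySem.Set.ofList vs, k)
    = ((PySem.Set.ofList (vs ++ pvValid icd l)).map pvMkLink,
       PySem.Set.ofList (vs ++ pvValid icd l),
       k + ((l.map (pvPairOf icd)).countP (fun p => !(pvTruthy p.1 && pvTruthy p.2)) : Int)) := by
  induction l generalizing vs k with
  | nil => simp [pvValid]
  | cons x xs ih =>
    simp only [List.foldl_cons]
    by_cases h : (pvTruthy (pvPairOf icd x).1 && pvTruthy (pvPairOf icd x).2) = true
    · rw [Bool.and_eq_true] at h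
      have hval : pvValid icd (x :: xs)
          = ((pvPairOf icd x).1.getD "", (pvPairOf icd x).2.getD "") :: pvValid icd xs := by
        simp [pvValid, h.1, h.2]
      have hcnt : ((x :: xs).map (pvPairOf icd)).countP (fun p => !(pvTruthy p.1 && pvTruthy p.2))
          = (xs.map (pvPairOf icd)).countP (fun p => !(pvTruthy p.1 && pvTruthy p.2)) := by
        simp [h.1, h.2]
      set p := ((pvPairOf icd x).1.getD "", (pvPairOf icd x).2.getD "") with hp
      by_cases hmem : p ∈ vs
      · have hmemS : p ∈ PySem.Set.ofList vs := (PySem.Set.mem_ofList _ _).mpr hmem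
        have hstep : pvStep icd ((PySem.Set.ofList vs).map pvMkLink, PySem.Set.ofList vs, k) x
            = ((PySem.Set.ofList vs).map pvMkLink, PySem.Set.ofList vs, k) := by
          simp only [pvStep, h.1, h.2, Bool.and_self, if_pos trivial, ← hp]
          simp only [PySem.Set.contains_eq_listContains, List.contains_eq_mem,
            decide_eq_true_eq]
          rw [if_pos hmemS]
        rw [hstep, ih]
        have hof : PySem.Set.ofList (vs ++ [p]) = PySem.Set.ofList vs := by
          rw [PySem.Set.ofList_append_singleton, PySem.Set.add_of_mem hmemS]
        have hrw : vs ++ pvValid icd (x :: xs) = (vs ++ [p]) ++ pvValid icd xs := by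
          simp [hval]
        rw [hrw, PySem.Set.ofList_append, PySem.Set.ofList_append, hof, hcnt]
      · have hmemS : p ∉ PySem.Set.ofList vs := fun hc => hmem ((PySem.Set.mem_ofList _ _).mp hc)
        have hc : PySem.Set.contains (PySem.Set.ofList vs) p = false := by
          by_contra hcc
          exact hmemS ((PySem.Set.contains_iff _ _).mp (by simpa using hcc))
        have hstep : pvStep icd ((PySem.Set.ofList vs).map pvMkLink, PySem.Set.ofList vs, k) x
            = (((PySem.Set.ofList vs) ++ [p]).map pvMkLink, PySem.Set.ofList vs ++ [p], k) := by
          simp only [pvStep, h.1, h.2, Bool.and_self, if_pos trivial, ← hp]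
          simp only [PySem.Set.contains_eq_listContains, List.contains_eq_mem,
            decide_eq_true_eq]
          rw [if_neg hmemS, PySem.Set.add_of_not_mem hmemS]
          simp [List.map_append]
        have hset : PySem.Set.ofList vs ++ [p] = PySem.Set.ofList (vs ++ [p]) := by
          rw [PySem.Set.ofList_append_singleton, PySem.Set.add_of_not_mem hmemS]
        rw [hstep, hset, ih]
        have hrw : vs ++ pvValid icd (x :: xs) = (vs ++ [p]) ++ pvValid icd xs := by
          simp [hval]
        rw [hrw, hcnt]
    · have hb : (pvTruthy (pvPairOf icd x).1 && pvTruthy (pvPairOf icd x).2) = false :=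
        Bool.eq_false_iff.mpr h
      have hstep : pvStep icd ((PySem.Set.ofList vs).map pvMkLink, PySem.Set.ofList vs, k) x
          = ((PySem.Set.ofList vs).map pvMkLink, PySem.Set.ofList vs, k + 1) := by
        simp [pvStep, hb]
      have hval : pvValid icd (x :: xs) = pvValid icd xs := by
        simp only [pvValid, List.map_cons, List.filterMap_cons]
        rw [if_neg h]
      rw [hstep, ih, hval]
      have hcnt : ((x :: xs).map (pvPairOf icd)).countP (fun p => !(pvTruthy p.1 && pvTruthy p.2))
          = (xs.map (pvPairOf icd)).countP (fun p => !(pvTruthy p.1 && pvTruthy p.2)) + 1 := by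
        simp only [List.map_cons, List.countP_cons]
        rw [if_pos (by simp [hb])]
      rw [hcnt]
      push_cast
      ring_nf

-- ===== VERDICT (by name: the statement is the Claim_ definition above) =====
theorem create_component_links_spec : Claim_equal_create_component_links := by
  intro dl icd _
  show _ = _
  have hfold : create_component_links dl icd
      = (let st := dl.foldl (pvStep icd) ([], PySem.Set.empty, 0); (st.1, st.2.2)) := rfl
  rw [hfold]
  have h := pvLoop_inv icd dl [] 0
  simp only [PySem.Set.ofList_nil, List.map_nil, List.nil_append, zero_add] at h
  show (let st := dl.foldl (pvStep icd) ([], PySem.Set.empty, 0); (st.1, st.2.2))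
      = create_component_links_alt dl icd
  rw [show ([] : PySem.Set (String × String)) = PySem.Set.empty from rfl] at h
  rw [h]
  unfold create_component_links_alt
  simp [pvValid, pvPairOf, List.countP_map, Function.comp_def]
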